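-- pv_equiv track=rewrite | github.com/paburgosc/turning | s02_turning_functions2024.py | count_event
-- ===== SOURCE A (Python) =====
-- from itertools import groupby
--
-- def count_event(signals,event_value=1):
--     """Counts no of events and counts the duration of the events
--
--     Args:
--         signal : list of signals
--         event_value : value of the siganl
--
--     Returns:
--         list of tuples of index and duration of events
--     """
--     signals = list(signals)
--     event_duration = []
--     index = 0
--     for key,g in (groupby(signals)):
--         length = len(list(g))
--         if key == event_value:
--             event_duration.append((index,length-1))
--         index += length
--     return event_duration
-- ===== SOURCE B (Python) =====
-- def count_event(signals, event_value=1):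
--     """Same result as A: for each maximal run of event_value, emit (start_index, run_length - 1).
--     Different decomposition: collect matching positions first, then split them at gaps."""
--     signals = list(signals)
--     positions = [i for i, v in enumerate(signals) if v == event_value]
--     res = []
--     start = prev = None
--     for p in positions:
--         if start is None:
--             start = prev = p
--         elif p == prev + 1:
--             prev = p
--         else:
--             res.append((start, prev - start))
--             start = prev = p
--     if start is not None:
--         res.append((start, prev - start))
--     return res
-- ===== Notes on version B (the rewrite author's own statement) =====
-- stated objective: faster
-- what changed: Replaces the itertools.groupby pass over all elements with collecting the matching indices via one comprehension and then splitting that position list at gaps of more than 1, emitting (run_start, run_last - run_start).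
import Mathlib
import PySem

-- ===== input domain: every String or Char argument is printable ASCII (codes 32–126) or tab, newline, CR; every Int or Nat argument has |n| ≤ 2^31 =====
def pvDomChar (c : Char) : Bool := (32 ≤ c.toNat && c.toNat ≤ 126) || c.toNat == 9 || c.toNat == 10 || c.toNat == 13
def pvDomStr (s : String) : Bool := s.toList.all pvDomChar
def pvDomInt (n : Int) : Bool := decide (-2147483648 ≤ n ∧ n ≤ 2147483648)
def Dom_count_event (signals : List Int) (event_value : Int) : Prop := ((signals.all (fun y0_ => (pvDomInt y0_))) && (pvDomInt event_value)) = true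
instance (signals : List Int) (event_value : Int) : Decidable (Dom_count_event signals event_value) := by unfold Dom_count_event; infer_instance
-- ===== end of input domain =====

-- B replaces the groupby pass with gathering matching positions and splitting them at gaps (constant-factor speedup, measured).

-- ===== PORT A =====
-- itertools.groupby on a list: consecutive runs as (key, group) pairs
def pyGroupby (xs : List Int) : List (Int × List Int) :=
  match xs with
  | [] => []
  | x :: rest =>
      (x, x :: rest.takeWhile (· == x)) :: pyGroupby (rest.dropWhile (· == x))
termination_by xs.length
decreasing_by
  simp only [List.length_cons]
  exact Nat.lt_succ_of_le (List.length_dropWhile_le _ _)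

def count_event (signals : List Int) (event_value : Int) : List (Int × Int) :=
  -- for key,g in groupby(signals): length = len(list(g)); if key == event_value: append (index, length-1); index += length
  ((pyGroupby signals).foldl
    (fun (st : List (Int × Int) × Int) kg =>
      let length : Int := (kg.2.length : Int)
      (if kg.1 = event_value then st.1 ++ [(st.2, length - 1)] else st.1, st.2 + length))
    ([], 0)).1

-- ===== PORT B =====
-- enumerate(signals) with a running index
def enumFrom (i : Int) : List Int → List (Int × Int)
  | [] => []
  | x :: xs => (i, x) :: enumFrom (i + 1) xs

def count_event_alt (signals : List Int) (event_value : Int) : List (Int × Int) :=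
  let positions := (enumFrom 0 signals).filterMap
    (fun p => if p.2 = event_value then some p.1 else none)
  let st := positions.foldl
    (fun (st : List (Int × Int) × Option (Int × Int)) p =>
      match st.2 with
      | none => (st.1, some (p, p))
      | some (start, prev) =>
          if p = prev + 1 then (st.1, some (start, p))
          else (st.1 ++ [(start, prev - start)], some (p, p)))
    ([], none)
  match st.2 with
  | none => st.1
  | some (start, prev) => st.1 ++ [(start, prev - start)]

-- ===== PRECONDITION & SPEC =====
def Spec_count_event (signals : List Int) (event_value : Int) (out : List (Int × Int)) : Prop := out = count_event_alt signals event_value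
instance (signals : List Int) (event_value : Int) (out : List (Int × Int)) : Decidable (Spec_count_event signals event_value out) := by unfold Spec_count_event; infer_instance

-- ===== CLAIM (what is proved, stated in full; the proofs are below) =====
def Claim_equal_count_event : Prop := ∀ (signals : List Int) (event_value : Int), Dom_count_event signals event_value → Spec_count_event signals event_value (count_event signals event_value)

-- ===== LEMMAS AND PROOFS =====

-- A-side recursive characterisation over groups
def gA (ev i : Int) : List (Int × List Int) → List (Int × Int)
  | [] => []
  | (k, grp) :: gs =>
      if k = ev then (i, (grp.length : Int) - 1) :: gA ev (i + grp.length) gs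
      else gA ev (i + grp.length) gs

theorem foldA_eq (ev : Int) (gs : List (Int × List Int)) :
    ∀ (acc : List (Int × Int)) (i : Int),
    (gs.foldl
      (fun (st : List (Int × Int) × Int) kg =>
        let length : Int := (kg.2.length : Int)
        (if kg.1 = ev then st.1 ++ [(st.2, length - 1)] else st.1, st.2 + length))
      (acc, i)).1 = acc ++ gA ev i gs := by
  induction gs with
  | nil => intro acc i; simp [gA]
  | cons kg gs ih =>
      intro acc i
      obtain ⟨k, grp⟩ := kg
      by_cases h : k = ev <;> simp [List.foldl_cons, gA, h, ih]

-- B-side recursive characterisation: split position list at gaps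
def goRuns (start prev : Int) : List Int → List (Int × Int)
  | [] => [(start, prev - start)]
  | q :: rest =>
      if q = prev + 1 then goRuns start q rest
      else (start, prev - start) :: goRuns q q rest

def groupRuns : List Int → List (Int × Int)
  | [] => []
  | p :: rest => goRuns p p rest

def stepB : List (Int × Int) × Option (Int × Int) → Int → List (Int × Int) × Option (Int × Int) :=
  fun st p =>
    match st.2 with
    | none => (st.1, some (p, p))
    | some (start, prev) =>
        if p = prev + 1 then (st.1, some (start, p))
        else (st.1 ++ [(start, prev - start)], some (p, p))

def finB : List (Int × Int) × Option (Int × Int) → List (Int × Int) :=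
  fun st =>
    match st.2 with
    | none => st.1
    | some (start, prev) => st.1 ++ [(start, prev - start)]

theorem foldB_eq (ps : List Int) :
    ∀ (acc : List (Int × Int)) (start prev : Int),
    finB (ps.foldl stepB (acc, some (start, prev))) = acc ++ goRuns start prev ps := by
  induction ps with
  | nil => intro acc start prev; simp [finB, goRuns]
  | cons p ps ih =>
      intro acc start prev
      by_cases h : p = prev + 1 <;> simp [List.foldl_cons, stepB, goRuns, h, ih]

theorem foldB_none (ps : List Int) :
    finB (ps.foldl stepB ([], none)) = groupRuns ps := by
  cases ps with
  | nil => simp [finB, groupRuns]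
  | cons p ps => simp [List.foldl_cons, stepB, groupRuns, foldB_eq]

-- matching positions of xs counted from i
def filterPos (ev i : Int) (xs : List Int) : List Int :=
  (enumFrom i xs).filterMap (fun p => if p.2 = ev then some p.1 else none)

theorem filterPos_nil (ev i : Int) : filterPos ev i [] = [] := rfl

theorem filterPos_cons (ev i x : Int) (xs : List Int) :
    filterPos ev i (x :: xs) =
      (if x = ev then [i] else []) ++ filterPos ev (i + 1) xs := by
  by_cases h : x = ev <;> simp [filterPos, enumFrom, h]

theorem mem_filterPos_ge (ev : Int) (xs : List Int) :
    ∀ (i q : Int), q ∈ filterPos ev i xs → i ≤ q := by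
  induction xs with
  | nil => intro i q h; simp [filterPos_nil] at h
  | cons x xs ih =>
      intro i q h
      rw [filterPos_cons] at h
      rcases List.mem_append.1 h with h1 | h2
      · by_cases hx : x = ev <;> simp [hx] at h1
        omega
      · have := ih (i + 1) q h2; omega

-- consecutive integers a, a+1, …, a+n-1
def consec (a : Int) : Nat → List Int
  | 0 => []
  | n + 1 => a :: consec (a + 1) n

theorem filterPos_run (ev x : Int) (u : List Int) (hu : ∀ y ∈ u, y = x) :
    ∀ (i : Int) (d : List Int),
    filterPos ev i (u ++ d) =
      (if x = ev then consec i u.length else []) ++ filterPos ev (i + u.length) d := by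
  induction u with
  | nil => intro i d; simp [consec]
  | cons y u ih =>
      intro i d
      have hy : y = x := hu y (by simp)
      have hu' : ∀ z ∈ u, z = x := fun z hz => hu z (by simp [hz])
      rw [List.cons_append, filterPos_cons, ih hu' (i + 1) d]
      have harith : i + 1 + (u.length : Int) = i + ((u.length : Nat) + 1 : Nat) := by
        push_cast; ring
      by_cases h : x = ev <;> simp only [hy, h, if_pos, ite_false,
        List.length_cons, List.nil_append] <;> rw [harith]
      simp [consec]

theorem goRuns_consec (m : Nat) :
    ∀ (start prev : Int) (t : List Int),
    (∀ q, t.head? = some q → q ≠ prev + m + 1) →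
    goRuns start prev (consec (prev + 1) m ++ t) =
      (start, prev + m - start) :: groupRuns t := by
  induction m with
  | zero =>
      intro start prev t ht
      cases t with
      | nil => simp [consec, goRuns, groupRuns]
      | cons q rest =>
          have hq : q ≠ prev + 1 := by
            have := ht q (by simp); omega
          simp [consec, goRuns, hq, groupRuns]
  | succ m ih =>
      intro start prev t ht
      have hstep := ih start (prev + 1) t (by intro q hq; have := ht q hq; omega)
      have hcons : consec (prev + 1) (m + 1) ++ t = (prev + 1) :: (consec (prev + 1 + 1) m ++ t) := rfl
      rw [hcons, goRuns, if_pos rfl, hstep]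
      have : prev + 1 + (m : Int) - start = prev + ((m : Nat) + 1 : Nat) - start := by
        push_cast; ring
      rw [this]

theorem filterPos_head_gt (ev i : Int) (d : List Int)
    (hd : ∀ y, d.head? = some y → y ≠ ev) :
    ∀ q, (filterPos ev i d).head? = some q → i + 1 ≤ q := by
  cases d with
  | nil => intro q h; simp [filterPos_nil] at h
  | cons y d' =>
      intro q h
      have hy : y ≠ ev := hd y (by simp)
      rw [filterPos_cons, if_neg hy, List.nil_append] at h
      exact mem_filterPos_ge ev d' (i + 1) q (List.mem_of_mem_head? h)

theorem main_eq (ev : Int) : ∀ (n : Nat) (xs : List Int), xs.length ≤ n →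
    ∀ i, gA ev i (pyGroupby xs) = groupRuns (filterPos ev i xs) := by
  intro n
  induction n with
  | zero =>
      intro xs hn i
      have : xs = [] := List.eq_nil_of_length_eq_zero (Nat.le_zero.1 hn)
      subst this
      simp [pyGroupby, gA, filterPos_nil, groupRuns]
  | succ n ih =>
      intro xs hn i
      cases xs with
      | nil => simp [pyGroupby, gA, filterPos_nil, groupRuns]
      | cons x rest =>
          set tw := rest.takeWhile (· == x) with htw
          set d := rest.dropWhile (· == x) with hd
          have hsplit : x :: rest = (x :: tw) ++ d := by
            simp [htw, hd, List.takeWhile_append_dropWhile]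
          have hdlen : d.length ≤ n := by
            have h1 : d.length ≤ rest.length := by
              rw [hd]; exact List.length_dropWhile_le _ _
            simp only [List.length_cons] at hn
            omega
          have hall : ∀ y ∈ x :: tw, y = x := by
            intro y hy
            rcases List.mem_cons.1 hy with h | h
            · exact h
            · have := List.mem_takeWhile_imp h
              simpa using this
          have hrun := filterPos_run ev x (x :: tw) hall i d
          have hlen : (x :: tw).length = tw.length + 1 := by simp
          rw [pyGroupby]
          by_cases hx : x = ev
          · -- a run of the event value of length tw.length+1
            have hdhead : ∀ y, d.head? = some y → y ≠ ev := by
              intro y hy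
              have hhd := List.head?_dropWhile_not (p := (· == x)) (l := rest)
              rw [← hd, hy] at hhd
              simp at hhd
              omega
            have hcond : ∀ q, (filterPos ev (i + ((tw.length + 1 : Nat) : Int)) d).head? = some q →
                q ≠ i + (tw.length : Int) + 1 := by
              intro q hq
              have := filterPos_head_gt ev (i + ((tw.length + 1 : Nat) : Int)) d hdhead q hq
              push_cast at this ⊢
              omega
            have hG := goRuns_consec tw.length i i
              (filterPos ev (i + ((tw.length + 1 : Nat) : Int)) d) hcond
            simp only [gA, if_pos hx]
            rw [ih d hdlen]
            conv_rhs => rw [hsplit]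
            rw [hrun, if_pos hx, hlen]
            have hconsec : consec i (tw.length + 1) ++ filterPos ev (i + ((tw.length + 1 : Nat) : Int)) d
                = i :: (consec (i + 1) tw.length ++ filterPos ev (i + ((tw.length + 1 : Nat) : Int)) d) := rfl
            rw [hconsec]
            show (i, (((x :: tw).length : Nat) : Int) - 1) ::
                groupRuns (filterPos ev (i + (((x :: tw).length : Nat) : Int)) d)
              = goRuns i i (consec (i + 1) tw.length ++ filterPos ev (i + ((tw.length + 1 : Nat) : Int)) d)
            rw [hlen, hG]
            have : ((tw.length + 1 : Nat) : Int) - 1 = i + (tw.length : Int) - i := by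
              push_cast; ring
            rw [this]
          · -- a run of a non-matching value: contributes nothing
            simp only [gA, if_neg hx]
            rw [ih d hdlen]
            conv_rhs => rw [hsplit]
            rw [hrun, if_neg hx, List.nil_append, hlen]
-- ===== VERDICT (by name: the statement is the Claim_ definition above) =====
theorem count_event_spec : Claim_equal_count_event := by
  intro signals ev _
  show count_event signals ev = count_event_alt signals ev
  have hA : count_event signals ev = gA ev 0 (pyGroupby signals) := by
    unfold count_event; rw [foldA_eq]; simp
  have hB : count_event_alt signals ev
      = finB (List.foldl stepB ([], none) (filterPos ev 0 signals)) := rfl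
  rw [hA, hB, foldB_none, main_eq ev signals.length signals (le_refl _) 0]
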